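-- pv_equiv track=rewrite | github.com/zhaozhengcoder/Algorithm | ---Others---/url长链接转短链接/longurl_to_shorturl.py | base_10to62
-- ===== SOURCE A (Python) =====
-- def base_10to62(val):
--     res=[]
--     base =62
--     while (val!=0):
--         yushu =val%base
--         shang =val//base
--         val = shang
--         res.append(yushu)
--     return res
-- ===== SOURCE B (Python) =====
-- def base_10to62(val):
--     powers = []
--     p = 1
--     while p <= val:
--         powers.append(p)
--         p *= 62
--     return [(val // p) % 62 for p in powers]
-- ===== Notes on version B (the rewrite author's own statement) =====
-- stated objective: alternative
-- what changed: Instead of destructively dividing val in one loop while appending remainders, B first builds the list of powers of 62 not exceeding val and then computes each digit independently as (val // power) % 62 in a comprehension.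
import Mathlib
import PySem

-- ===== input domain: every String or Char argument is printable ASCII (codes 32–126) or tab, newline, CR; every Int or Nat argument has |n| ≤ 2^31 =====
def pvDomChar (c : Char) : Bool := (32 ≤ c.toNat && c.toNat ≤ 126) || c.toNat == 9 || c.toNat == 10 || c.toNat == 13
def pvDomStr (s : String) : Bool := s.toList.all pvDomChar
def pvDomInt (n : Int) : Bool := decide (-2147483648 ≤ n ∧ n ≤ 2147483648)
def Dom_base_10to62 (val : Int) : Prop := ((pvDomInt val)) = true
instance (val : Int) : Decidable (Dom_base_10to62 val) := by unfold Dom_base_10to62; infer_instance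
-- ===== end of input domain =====

-- B replaces A's single destructive loop on val by two stages: build the powers of 62
-- not exceeding val, then compute each digit independently as (val // power) % 62 (alternative).
-- A never returns on negative input (it loops forever), so Pre_ restricts to 0 ≤ val.

-- ===== PORT A =====
-- while-loop as fuel-guarded tail recursion over the same state (res, val); the fuel merely
-- makes the loop total in Lean and for any 0 ≤ val the fuel val.natAbs + 1 is sufficient.
def base_10to62_loopA : Nat → Int → List Int → List Int
  | 0, _, res => res
  | fuel + 1, val, res =>
    if val ≠ 0 then
      base_10to62_loopA fuel (PySem.Int.floordiv val 62) (res ++ [PySem.Int.mod val 62])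
    else res

def base_10to62 (val : Int) : List Int :=
  base_10to62_loopA (val.natAbs + 1) val []

-- ===== PORT B =====
-- first stage: the powers loop (while p <= val: powers.append(p); p *= 62), fuel-guarded;
-- fuel val.natAbs + 1 is sufficient since p at least doubles each iteration.
def base_10to62_powGo : Nat → Int → Int → List Int → List Int
  | 0, _, _, powers => powers
  | fuel + 1, p, val, powers =>
    if p ≤ val then base_10to62_powGo fuel (p * 62) val (powers ++ [p])
    else powers

-- second stage: the comprehension [(val // p) % 62 for p in powers]
def base_10to62_alt (val : Int) : List Int :=
  (base_10to62_powGo (val.natAbs + 1) 1 val []).map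
    (fun p => PySem.Int.mod (PySem.Int.floordiv val p) 62)

-- ===== PRECONDITION & SPEC =====
-- On val < 0 the Python A loops forever (val//62 stays nonzero), so it never returns.
def Pre_base_10to62 (val : Int) : Prop := 0 ≤ val
instance (val : Int) : Decidable (Pre_base_10to62 val) := by unfold Pre_base_10to62; infer_instance
def pvWitness_base_10to62 : Int := (7562)

def Spec_base_10to62 (val : Int) (out : List Int) : Prop := out = base_10to62_alt val
instance (val : Int) (out : List Int) : Decidable (Spec_base_10to62 val out) := by unfold Spec_base_10to62; infer_instance

-- ===== CLAIM (what is proved, stated in full; the proofs are below) =====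
def Claim_equal_base_10to62 : Prop := ∀ (val : Int), Dom_base_10to62 val → Pre_base_10to62 val → Spec_base_10to62 val (base_10to62 val)

-- ===== LEMMAS AND PROOFS =====

-- reference recursion used only by the proofs: digits least-significant first
def pvSpecGo : Nat → Int → List Int
  | 0, _ => []
  | fuel + 1, val =>
    if val = 0 then []
    else PySem.Int.mod val 62 :: pvSpecGo fuel (PySem.Int.floordiv val 62)

def pvSpecFn (val : Int) : List Int := pvSpecGo (val.natAbs + 1) val

lemma base_10to62_step (val : Int) (h : 0 < val) :
    0 ≤ PySem.Int.floordiv val 62 ∧ (PySem.Int.floordiv val 62).natAbs < val.natAbs := by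
  rw [PySem.Int.floordiv_eq_ediv_of_pos (by omega)]
  omega

lemma pvSpecGo_irrel2 : ∀ (f g : Nat) (val : Int), 0 ≤ val → val.natAbs < f → val.natAbs < g →
    pvSpecGo f val = pvSpecGo g val := by
  intro f
  induction f using Nat.strong_induction_on with
  | _ f ih =>
    intro g val hv hf hg
    match f, g with
    | 0, _ => omega
    | _ + 1, 0 => omega
    | f + 1, g + 1 =>
      by_cases h0 : val = 0
      · simp [pvSpecGo, h0]
      · have hstep := base_10to62_step val (by omega)
        simp only [pvSpecGo, h0, if_false]
        rw [ih f (by omega) g _ hstep.1 (by omega) (by omega)]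

lemma pvSpecGo_irrel (f : Nat) (val : Int) (hv : 0 ≤ val) (hf : val.natAbs < f) :
    pvSpecGo f val = pvSpecFn val :=
  pvSpecGo_irrel2 f (val.natAbs + 1) val hv hf (by omega)

-- the A-side loop equals res ++ the reference digits, for sufficient fuel
lemma base_10to62_loopA_eq : ∀ (f : Nat) (val : Int) (res : List Int), 0 ≤ val → val.natAbs < f →
    base_10to62_loopA f val res = res ++ pvSpecFn val := by
  intro f
  induction f using Nat.strong_induction_on with
  | _ f ih =>
    intro val res hv hf
    match f with
    | 0 => omega
    | f + 1 =>
      by_cases h0 : val = 0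
      · simp [base_10to62_loopA, pvSpecFn, pvSpecGo, h0]
      · have hstep := base_10to62_step val (by omega)
        have hrec := ih f (by omega) (PySem.Int.floordiv val 62)
          (res ++ [PySem.Int.mod val 62]) hstep.1 (by omega)
        have halt : pvSpecFn val
            = PySem.Int.mod val 62 :: pvSpecFn (PySem.Int.floordiv val 62) := by
          conv_lhs => unfold pvSpecFn
          simp only [pvSpecGo, h0, if_false]
          rw [pvSpecGo_irrel _ _ hstep.1 (by omega)]
        simp only [base_10to62_loopA, h0, ne_eq, not_false_eq_true, if_true, hrec, halt]
        simp

-- the powers loop only appends to its accumulator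
lemma base_10to62_powGo_acc : ∀ (f : Nat) (p val : Int) (acc : List Int),
    base_10to62_powGo f p val acc = acc ++ base_10to62_powGo f p val [] := by
  intro f
  induction f with
  | zero => intro p val acc; simp [base_10to62_powGo]
  | succ f ih =>
    intro p val acc
    by_cases h : p ≤ val
    · simp only [base_10to62_powGo, h, if_true]
      rw [ih (p * 62) val (acc ++ [p]), ih (p * 62) val ([] ++ [p])]
      simp
    · simp [base_10to62_powGo, h]

-- B's mapped powers list equals the reference digits of val // p
lemma base_10to62_pow_map : ∀ (f : Nat) (p val : Int), 1 ≤ p → 0 ≤ val → (val / p).toNat < f →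
    (base_10to62_powGo f p val []).map
      (fun q => PySem.Int.mod (PySem.Int.floordiv val q) 62)
      = pvSpecFn (PySem.Int.floordiv val p) := by
  intro f
  induction f using Nat.strong_induction_on with
  | _ f ih =>
    intro p val hp hv hf
    match f with
    | 0 => omega
    | f + 1 =>
      have hq : PySem.Int.floordiv val p = val / p := PySem.Int.floordiv_eq_ediv_of_pos (by omega)
      by_cases h : p ≤ val
      · have hpos : 1 ≤ val / p := by
          rw [Int.le_ediv_iff_mul_le (by omega)]; omega
        have hdd : val / (p * 62) = val / p / 62 := (Int.ediv_ediv_of_nonneg (show (0:Int) ≤ p by omega)).symm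
        have hlt : (val / (p * 62)).toNat < (val / p).toNat := by
          rw [hdd]; omega
        simp only [base_10to62_powGo, h, if_true]
        rw [base_10to62_powGo_acc]
        simp only [List.map_cons, List.nil_append, List.singleton_append]
        rw [ih f (by omega) (p * 62) val (by omega) hv (by omega)]
        have hq62 : PySem.Int.floordiv val (p * 62) = val / p / 62 := by
          rw [PySem.Int.floordiv_eq_ediv_of_pos (by omega), hdd]
        rw [hq62]
        have hne : val / p ≠ 0 := by omega
        conv_rhs => rw [hq]; unfold pvSpecFn
        simp only [pvSpecGo, hne, if_false]
        rw [PySem.Int.floordiv_eq_ediv_of_pos (a := val / p) (by omega)]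
        rw [pvSpecGo_irrel _ _ (by omega) (by omega)]
        rw [hq]
      · have h0 : val / p = 0 := by
          have : val / p < 1 := by
            by_contra hc
            push Not at hc
            rw [Int.le_ediv_iff_mul_le (by omega)] at hc
            omega
          have : 0 ≤ val / p := by positivity
          omega
        simp [base_10to62_powGo, h, hq, h0, pvSpecFn, pvSpecGo]

-- ===== VERDICT (by name: the statement is the Claim_ definition above) =====
theorem base_10to62_spec : Claim_equal_base_10to62 := by
  intro val _ hpre
  unfold Spec_base_10to62 base_10to62 base_10to62_alt
  rw [base_10to62_loopA_eq (val.natAbs + 1) val [] hpre (by omega)]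
  rw [base_10to62_pow_map (val.natAbs + 1) 1 val (by omega) hpre (by rw [Int.ediv_one]; omega)]
  rw [PySem.Int.floordiv_eq_ediv_of_pos (by omega)]
  simp
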